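-- pv_equiv track=rewrite | github.com/kunaldeshmukh-5245/DataEngineering | salary_insights_project/utils/analysis.py | bucket_salaries
-- ===== SOURCE A (Python) =====
-- def bucket_salaries(data):
--     """
--     Bucket salaries into ranges defined by the bucket size.
--     Returns a dictionary with salary ranges as keys and counts as values.
--     """
--     for row in data:
--         if 'salary' in row and 'name' in row:
--             if int(row['salary']) >= 150000:
--                 row['salary_level'] = "Executive"
--             elif int(row['salary']) >= 80000:
--                 row['salary_level'] = "Manager"
--             else:
--                 row['salary_level'] = "Staff"
--     return data
-- ===== SOURCE B (Python) =====
-- def bucket_salaries(data):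
--     # Staged overwrite passes: first default every eligible row to "Staff",
--     # then promote rows meeting each threshold; mutates rows in place like A.
--     for row in data:
--         if 'salary' in row and 'name' in row:
--             row['salary_level'] = "Staff"
--     for row in data:
--         if 'salary' in row and 'name' in row and int(row['salary']) >= 80000:
--             row['salary_level'] = "Manager"
--     for row in data:
--         if 'salary' in row and 'name' in row and int(row['salary']) >= 150000:
--             row['salary_level'] = "Executive"
--     return data
-- ===== Notes on version B (the rewrite author's own statement) =====
-- stated objective: alternative
-- what changed: Replaces A's single pass with a per-row three-way if/elif by three staged passes over the whole list: the first defaults every eligible row to 'Staff', the second overwrites rows with salary >= 80000 to 'Manager', the third overwrites rows with salary >= 150000 to 'Executive'; the last write wins.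
import Mathlib
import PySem

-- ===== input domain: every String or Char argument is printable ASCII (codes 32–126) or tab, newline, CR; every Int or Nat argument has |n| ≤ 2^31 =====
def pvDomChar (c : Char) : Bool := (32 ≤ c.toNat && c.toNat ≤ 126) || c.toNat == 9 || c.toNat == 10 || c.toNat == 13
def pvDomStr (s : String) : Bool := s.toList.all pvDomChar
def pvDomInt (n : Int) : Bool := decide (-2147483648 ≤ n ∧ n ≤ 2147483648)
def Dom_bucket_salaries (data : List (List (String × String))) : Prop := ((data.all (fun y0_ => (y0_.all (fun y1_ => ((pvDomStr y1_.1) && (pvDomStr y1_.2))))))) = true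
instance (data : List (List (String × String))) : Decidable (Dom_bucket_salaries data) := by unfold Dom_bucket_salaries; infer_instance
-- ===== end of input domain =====

-- B replaces A's single-pass if/elif labelling by three staged overwrite passes (default to
-- "Staff", then promote by threshold); both Pythons mutate rows in place, so the equivalence
-- proved here is about the returned list of rows.
-- ===== PORT A =====
def bucket_salaries (data : List (List (String × String))) : List (List (String × String)) :=
  data.map (fun row =>
    let d := PySem.Dict.mk row
    if d.contains "salary" && d.contains "name" then
      match PySem.Int.ofStr? ((d.get? "salary").getD "") with
      | some v =>
        if v ≥ 150000 then (d.insert "salary_level" "Executive").items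
        else if v ≥ 80000 then (d.insert "salary_level" "Manager").items
        else (d.insert "salary_level" "Staff").items
      | none => row   -- int() raises ValueError here; excluded by Pre_
    else row)

-- ===== PORT B =====
def bucket_salaries_alt (data : List (List (String × String))) : List (List (String × String)) :=
  -- pass 1: every eligible row gets "Staff"
  let pass1 := data.map (fun row =>
    let d := PySem.Dict.mk row
    if d.contains "salary" && d.contains "name" then
      (d.insert "salary_level" "Staff").items
    else row)
  -- pass 2: eligible rows with salary >= 80000 are overwritten to "Manager"
  let pass2 := pass1.map (fun row =>
    let d := PySem.Dict.mk row
    if d.contains "salary" && d.contains "name" then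
      match PySem.Int.ofStr? ((d.get? "salary").getD "") with
      | some v => if v ≥ 80000 then (d.insert "salary_level" "Manager").items else row
      | none => row   -- int() raises ValueError here; excluded by Pre_
    else row)
  -- pass 3: eligible rows with salary >= 150000 are overwritten to "Executive"
  pass2.map (fun row =>
    let d := PySem.Dict.mk row
    if d.contains "salary" && d.contains "name" then
      match PySem.Int.ofStr? ((d.get? "salary").getD "") with
      | some v => if v ≥ 150000 then (d.insert "salary_level" "Executive").items else row
      | none => row   -- int() raises ValueError here; excluded by Pre_
    else row)

-- ===== PRECONDITION & SPEC =====
-- Pre_ excludes exactly the inputs where A raises ValueError: a row with both keys whose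
-- 'salary' value is not an int-literal string (B raises there too).
def Pre_bucket_salaries (data : List (List (String × String))) : Prop :=
  (data.all (fun row =>
    let d := PySem.Dict.mk row
    (!(d.contains "salary" && d.contains "name")) ||
      (PySem.Int.ofStr? ((d.get? "salary").getD "")).isSome)) = true
instance (data : List (List (String × String))) : Decidable (Pre_bucket_salaries data) := by
  unfold Pre_bucket_salaries; infer_instance
def pvWitness_bucket_salaries : (List (List (String × String))) :=
  [[("name", "alice"), ("salary", "100000")], [("name", "bob")]]

def Spec_bucket_salaries (data : List (List (String × String))) (out : List (List (String × String))) : Prop := out = bucket_salaries_alt data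
instance (data : List (List (String × String))) (out : List (List (String × String))) : Decidable (Spec_bucket_salaries data out) := by unfold Spec_bucket_salaries; infer_instance

-- ===== CLAIM (what is proved, stated in full; the proofs are below) =====
def Claim_equal_bucket_salaries : Prop := ∀ (data : List (List (String × String))), Dom_bucket_salaries data → Pre_bucket_salaries data → Spec_bucket_salaries data (bucket_salaries data)

-- ===== LEMMAS AND PROOFS =====

-- inserting twice at the same key collapses to the last insert
theorem insert_insert_self {κ ν : Type} [BEq κ] [LawfulBEq κ]
    (d : PySem.Dict κ ν) (k : κ) (a b : ν) :
    (d.insert k a).insert k b = d.insert k b := by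
  apply PySem.Dict.ext
  have hca : (d.insert k a).contains k = true := by
    rw [PySem.Dict.contains_insert]; simp
  by_cases hc : d.contains k = true
  · rw [PySem.Dict.items_insert_of_contains _ _ hca,
        PySem.Dict.items_insert_of_contains _ _ hc,
        PySem.Dict.items_insert_of_contains _ _ hc,
        List.map_map]
    apply List.map_congr_left
    intro p _
    by_cases h : p.1 == k <;> simp [h]
  · have hc' : d.contains k = false := by simpa using hc
    rw [PySem.Dict.items_insert_of_contains _ _ hca,
        PySem.Dict.items_insert_of_not_contains _ _ hc',
        PySem.Dict.items_insert_of_not_contains _ _ hc',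
        List.map_append]
    congr 1
    · have hmap : List.map (fun p => if (p.1 == k) = true then (k, b) else p) d.items
          = List.map id d.items := by
        apply List.map_congr_left
        intro p hp
        have hpk : p.1 ≠ k := by
          intro h
          have : k ∈ d.keys := by
            have := List.mem_map_of_mem (f := Prod.fst) hp
            simpa [PySem.Dict.keys, h] using this
          rw [← PySem.Dict.contains_iff_mem_keys] at this
          simp [hc'] at this
        simp [hpk]
      simpa using hmap
    · simp

-- ===== VERDICT (by name: the statement is the Claim_ definition above) =====
theorem bucket_salaries_spec : Claim_equal_bucket_salaries := by
  intro data _ hpre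
  unfold Spec_bucket_salaries bucket_salaries bucket_salaries_alt
  simp only [List.map_map]
  apply List.map_congr_left
  intro row hrow
  rw [Pre_bucket_salaries, List.all_eq_true] at hpre
  have h := hpre row hrow
  simp only [Function.comp]
  by_cases hc : ((PySem.Dict.mk row).contains "salary" && (PySem.Dict.mk row).contains "name") = true
  · simp only [hc, Bool.not_true, Bool.false_or] at h
    simp only [hc, if_true]
    have hcA := hc
    rcases Option.isSome_iff_exists.mp h with ⟨v, hv⟩
    rw [Bool.and_eq_true] at hc
    obtain ⟨hc1, hc2⟩ := hc
    -- state of the row after pass 1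
    set d := PySem.Dict.mk row with hd
    have hnes : ("salary_level" : String) ≠ "salary" := by decide
    have hnen : ("salary_level" : String) ≠ "name" := by decide
    have hmk1 : PySem.Dict.mk (d.insert "salary_level" "Staff").items
        = d.insert "salary_level" "Staff" := rfl
    have hcs : (d.insert "salary_level" "Staff").contains "salary" = true := by
      rw [PySem.Dict.contains_insert]; simp [hc1]
    have hcn : (d.insert "salary_level" "Staff").contains "name" = true := by
      rw [PySem.Dict.contains_insert]; simp [hc2]
    have hg1 : (d.insert "salary_level" "Staff").get? "salary" = d.get? "salary" :=
      PySem.Dict.get?_insert_of_ne _ _ (by decide)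
    simp only [hv, hmk1, hcs, hcn, hg1, Bool.and_self, if_true]
    by_cases h2 : v ≥ 80000
    · -- pass 2 overwrites to "Manager"
      simp only [h2, if_true, insert_insert_self]
      have hmk2 : PySem.Dict.mk (d.insert "salary_level" "Manager").items
          = d.insert "salary_level" "Manager" := rfl
      have hcs2 : (d.insert "salary_level" "Manager").contains "salary" = true := by
        rw [PySem.Dict.contains_insert]; simp [hc1]
      have hcn2 : (d.insert "salary_level" "Manager").contains "name" = true := by
        rw [PySem.Dict.contains_insert]; simp [hc2]
      have hg2 : (d.insert "salary_level" "Manager").get? "salary" = d.get? "salary" :=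
        PySem.Dict.get?_insert_of_ne _ _ (by decide)
      simp only [hmk2, hcs2, hcn2, hg2, hv, Bool.and_self, if_true]
      by_cases h3 : v ≥ 150000
      · simp [h3, insert_insert_self]
      · simp [h3]
    · -- pass 2 leaves "Staff"
      have h3 : ¬ v ≥ 150000 := by omega
      simp [h2, h3, hmk1, hcs, hcn, hg1, hv]
  · simp only [Bool.not_eq_true] at hc
    simp only [hc, Bool.false_eq_true, if_false]
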